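-- pv_equiv track=rewrite | github.com/bmechtley/pybatchdict | batch.py | pathcombos
-- ===== SOURCE A (Python) =====
-- from itertools import product
--
-- def pathcombos(paths, data):
--     """
--     :type paths: list
--     :param paths: list of str keypaths.
--     :type data: dict
--     :param data: original config dictionary with lists to which the keypaths refer.
--
--     Given a nested dictionary where some values are lists, return a list of flat dictionaries that are combinations of
--     all lists. Output dicts are of form {keypath: value} where the keypath is the full path to the nested dictionary
--     key that has an enumerable value and value is value for the individual combination.
--     """
--
--     keys = [key for key in paths if key.split('/')[-1] == 'iterate']
--
--     listkeys = [['/'.join(key.split('/')[:-1])] * len(paths[key]) for key in keys]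
--     listdata = [paths[key] for key in keys]
--
--     # O_o
--     combokeys = [a for a in product(*listkeys)]
--     combodata = [a for a in product(*listdata)]
--     combodict = [{k: v for k, v in zip(a, b)} for a, b in zip(combokeys, combodata)]
--
--     return combodict
-- ===== SOURCE B (Python) =====
-- def pathcombos(paths, data):
--     result = [{}]
--     for key in paths:
--         parts = key.split('/')
--         if parts[-1] == 'iterate':
--             parent = '/'.join(parts[:-1])
--             result = [{**d, parent: v} for d in result for v in paths[key]]
--     return result
-- ===== Notes on version B (the rewrite author's own statement) =====
-- stated objective: simpler
-- what changed: Replaces A's two itertools.product passes plus zip plus per-combination dict comprehension by a single incremental fold that extends partial dicts key by key (later keys vary fastest, matching product order).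
import Mathlib
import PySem

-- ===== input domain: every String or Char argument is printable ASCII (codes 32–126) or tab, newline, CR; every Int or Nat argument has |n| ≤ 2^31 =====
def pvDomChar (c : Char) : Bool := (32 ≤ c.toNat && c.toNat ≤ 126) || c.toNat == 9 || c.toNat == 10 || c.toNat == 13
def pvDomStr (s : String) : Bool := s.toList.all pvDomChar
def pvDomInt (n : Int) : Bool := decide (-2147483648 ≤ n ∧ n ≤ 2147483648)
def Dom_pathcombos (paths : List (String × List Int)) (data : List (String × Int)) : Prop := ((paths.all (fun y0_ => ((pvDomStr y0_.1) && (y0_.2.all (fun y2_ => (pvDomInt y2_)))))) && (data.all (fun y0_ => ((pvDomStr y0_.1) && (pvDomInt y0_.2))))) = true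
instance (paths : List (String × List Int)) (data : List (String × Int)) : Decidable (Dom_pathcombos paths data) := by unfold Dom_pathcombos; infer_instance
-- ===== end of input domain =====

-- B replaces the double itertools.product + zip of A by a single incremental fold that
-- extends partial dicts key by key (objective: simpler, same asymptotic cost).


-- ===== PORT A =====
-- itertools.product(*lists): first list varies slowest, last fastest
def pvProduct {α : Type} : List (List α) → List (List α)
  | [] => [[]]
  | xs :: rest => xs.flatMap (fun x => (pvProduct rest).map (x :: ·))

-- key.split('/') has a nonempty separator, so split? is always `some`; .getD [] is exact
def pathcombos (paths : List (String × List Int)) (data : List (String × Int)) : List (List (String × Int)) :=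
  let d := PySem.Dict.ofList paths
  let keys := d.keys.filter (fun key => PySem.List.pyGetD ((PySem.Str.split? key "/").getD []) (-1) "" == "iterate")
  let listkeys := keys.map (fun key => List.replicate (d.getD key []).length (PySem.Str.join "/" (PySem.List.slice ((PySem.Str.split? key "/").getD []) none (some (-1)))))
  let listdata := keys.map (fun key => d.getD key [])
  let combokeys := pvProduct listkeys
  let combodata := pvProduct listdata
  (combokeys.zip combodata).map (fun ab =>
    ((ab.1.zip ab.2).foldl (fun dd kv => dd.insert kv.1 kv.2) PySem.Dict.empty).items)

-- ===== PORT B =====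
def pathcombos_alt (paths : List (String × List Int)) (data : List (String × Int)) : List (List (String × Int)) :=
  let d := PySem.Dict.ofList paths
  (d.keys.foldl (fun result key =>
    let parts := (PySem.Str.split? key "/").getD []
    if PySem.List.pyGetD parts (-1) "" == "iterate" then
      let parent := PySem.Str.join "/" (PySem.List.slice parts none (some (-1)))
      result.flatMap (fun dd => (d.getD key []).map (fun v => dd.insert parent v))
    else result) [PySem.Dict.empty]).map (fun dd => dd.items)

-- ===== PRECONDITION & SPEC =====
def Spec_pathcombos (paths : List (String × List Int)) (data : List (String × Int)) (out : List (List (String × Int))) : Prop := out = pathcombos_alt paths data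
instance (paths : List (String × List Int)) (data : List (String × Int)) (out : List (List (String × Int))) : Decidable (Spec_pathcombos paths data out) := by unfold Spec_pathcombos; infer_instance

-- ===== CLAIM (what is proved, stated in full; the proofs are below) =====
def Claim_equal_pathcombos : Prop := ∀ (paths : List (String × List Int)) (data : List (String × Int)), Dom_pathcombos paths data → Spec_pathcombos paths data (pathcombos paths data)

-- ===== LEMMAS AND PROOFS =====

lemma pvProduct_length {α : Type} : ∀ ls : List (List α),
    (pvProduct ls).length = (ls.map List.length).prod := by
  intro ls
  induction ls with
  | nil => rfl
  | cons xs rest ih =>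
      simp [pvProduct, List.length_flatMap, ih]

lemma pvFoldl_flatMap {α : Type} (g : String → α → List α) :
    ∀ (ks : List String) (ds : List α),
      ks.foldl (fun res k => res.flatMap (g k)) ds
        = ds.flatMap (fun dd => ks.foldl (fun res k => res.flatMap (g k)) [dd]) := by
  intro ks
  induction ks with
  | nil => intro ds; simp
  | cons k ks ih =>
      intro ds
      simp only [List.foldl_cons]
      rw [ih (ds.flatMap (g k)), List.flatMap_assoc]
      congr 1
      funext dd
      simp only [List.flatMap_singleton]
      exact (ih (g k dd)).symm

lemma pvZip_rep_flatMap {α β : Type} (p : α) (A : List (List α)) (B : List (List β))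
    (h : A.length = B.length) :
    ∀ vs : List β,
      ((List.replicate vs.length p).flatMap (fun x => A.map (x :: ·))).zip
          (vs.flatMap (fun v => B.map (v :: ·)))
        = vs.flatMap (fun v => (A.zip B).map (fun ab => (p :: ab.1, v :: ab.2))) := by
  intro vs
  induction vs with
  | nil => simp
  | cons v vs ih =>
      simp only [List.length_cons, List.replicate_succ, List.flatMap_cons]
      rw [List.zip_append (by simp [h]), List.zip_map, ih]
      simp [Prod.map]

lemma pvMain (parent : String → String) (vals : String → List Int) :
    ∀ (ks : List String) (d0 : PySem.Dict String Int),
      ((pvProduct (ks.map fun k => List.replicate (vals k).length (parent k))).zip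
          (pvProduct (ks.map vals))).map
        (fun ab => (ab.1.zip ab.2).foldl (fun dd kv => dd.insert kv.1 kv.2) d0)
      = ks.foldl (fun result k =>
          result.flatMap (fun dd => (vals k).map (fun v => dd.insert (parent k) v))) [d0] := by
  intro ks
  induction ks with
  | nil => intro d0; rfl
  | cons k ks ih =>
      intro d0
      simp only [List.map_cons, pvProduct, List.foldl_cons]
      rw [pvZip_rep_flatMap (parent k) _ _ (by
        simp [pvProduct_length, List.map_map, Function.comp_def])]
      rw [List.map_flatMap]
      rw [pvFoldl_flatMap (fun k (dd : PySem.Dict String Int) => (vals k).map (fun v => dd.insert (parent k) v)) ks]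
      rw [List.flatMap_singleton, List.flatMap_map]
      congr 1
      funext v
      rw [List.map_map]
      have := ih (d0.insert (parent k) v)
      simp only [Function.comp_def, List.zip_cons_cons, List.foldl_cons] at this ⊢
      exact this

-- ===== VERDICT (by name: the statement is the Claim_ definition above) =====
theorem pathcombos_spec : Claim_equal_pathcombos := by
  intro paths data _
  show pathcombos paths data = pathcombos_alt paths data
  unfold pathcombos pathcombos_alt
  dsimp only
  conv_rhs => rw [← List.foldl_filter]
  rw [← pvMain (fun key => PySem.Str.join "/" (PySem.List.slice ((PySem.Str.split? key "/").getD []) none (some (-1))))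
        (fun key => (PySem.Dict.ofList paths).getD key [])
        ((PySem.Dict.ofList paths).keys.filter (fun key => PySem.List.pyGetD ((PySem.Str.split? key "/").getD []) (-1) "" == "iterate"))
        PySem.Dict.empty]
  simp [List.map_map, Function.comp_def]
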